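-- pv_equiv track=rewrite | github.com/hadidou09/Hadidou-Password-Generator | Password_Checking_Algorithm.py | length_check
-- ===== SOURCE A (Python) =====
-- def length_check(word):# Counting the number of characters in a password
--     count = 0
--     for i in word:
--         count += 1
--     if count >= 8:
--         return True
--     else:
--         return False
-- ===== SOURCE B (Python) =====
-- def length_check(word):
--     return len(word) >= 8
-- ===== Notes on version B (the rewrite author's own statement) =====
-- stated objective: idiomatic
-- what changed: Replaced the character-counting loop and if/else with a single len(word) >= 8 expression.
import Mathlib
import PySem

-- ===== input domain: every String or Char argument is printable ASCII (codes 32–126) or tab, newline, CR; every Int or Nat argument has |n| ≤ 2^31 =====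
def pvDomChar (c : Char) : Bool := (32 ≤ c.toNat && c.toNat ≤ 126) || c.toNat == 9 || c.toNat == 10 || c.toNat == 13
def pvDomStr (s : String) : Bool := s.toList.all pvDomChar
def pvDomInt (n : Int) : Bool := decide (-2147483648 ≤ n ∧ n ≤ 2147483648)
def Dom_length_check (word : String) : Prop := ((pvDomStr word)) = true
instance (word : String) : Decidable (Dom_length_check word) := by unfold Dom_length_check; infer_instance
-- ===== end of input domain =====

-- ===== PORT A =====
def length_check (word : String) : Bool :=
  let count := word.toList.foldl (fun count _ => count + 1) (0 : Int)
  if count ≥ 8 then true else false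

-- ===== PORT B =====
def length_check_alt (word : String) : Bool := PySem.Str.len word ≥ 8

-- ===== PRECONDITION & SPEC =====
def Spec_length_check (word : String) (out : Bool) : Prop := out = length_check_alt word
instance (word : String) (out : Bool) : Decidable (Spec_length_check word out) := by unfold Spec_length_check; infer_instance

-- ===== CLAIM (what is proved, stated in full; the proofs are below) =====
def Claim_equal_length_check : Prop := ∀ (word : String), Dom_length_check word → Spec_length_check word (length_check word)

-- ===== LEMMAS AND PROOFS =====

-- ===== VERDICT (by name: the statement is the Claim_ definition above) =====
theorem length_check_count (l : List Char) (n : Int) :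
    l.foldl (fun count _ => count + 1) n = n + l.length := by
  induction l generalizing n with
  | nil => simp
  | cons c t ih => simp [List.foldl, ih]; ring

theorem length_check_spec : Claim_equal_length_check := by
  intro word _
  unfold Spec_length_check length_check length_check_alt
  simp [length_check_count, PySem.Str.len]
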